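-- pv_equiv track=rewrite | github.com/MusabAlosaimi/Data-Classification1 | streamlit_app.py | calculate_classification
-- ===== SOURCE A (Python) =====
-- from typing import Dict, Any
--
-- def calculate_classification(assessment: Dict[str, Any]) -> str:
--     """Calculate classification based on impact assessment responses."""
--     all_responses = []
--     for category in assessment.values():
--         for subcategory in category.values():
--             for response in subcategory.values():
--                 all_responses.append(response)
--
--     high_count = all_responses.count('high')
--     medium_count = all_responses.count('medium')
--     low_count = all_responses.count('low')
--
--     if high_count > 0:
--         return 'top_secret'
--     elif medium_count > 0:
--         return 'secret'
--     elif low_count > 0: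
--         return 'restricted'
--     else:
--         return 'public'
-- ===== SOURCE B (Python) =====
-- from typing import Dict, Any
--
-- def calculate_classification(assessment: Dict[str, Any]) -> str:
--     """Calculate classification based on impact assessment responses."""
--     all_responses = []
--     for category in assessment.values():
--         for subcategory in category.values():
--             for response in subcategory.values():
--                 all_responses.append(response)
--     order = {'high': 0, 'medium': 1, 'low': 2}
--     best = min((order[r] for r in all_responses if r in order), default=3)
--     return ['top_secret', 'secret', 'restricted', 'public'][best]
-- ===== Notes on version B (the rewrite author's own statement) =====
-- stated objective: simpler
-- what changed: The three separate .count scans and the four-way if/elif priority chain are replaced by a single min-over-ranks reduction (rank map + min with default) followed by one index lookup into the label list; the flattening triple loop is kept verbatim.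
import Mathlib
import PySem

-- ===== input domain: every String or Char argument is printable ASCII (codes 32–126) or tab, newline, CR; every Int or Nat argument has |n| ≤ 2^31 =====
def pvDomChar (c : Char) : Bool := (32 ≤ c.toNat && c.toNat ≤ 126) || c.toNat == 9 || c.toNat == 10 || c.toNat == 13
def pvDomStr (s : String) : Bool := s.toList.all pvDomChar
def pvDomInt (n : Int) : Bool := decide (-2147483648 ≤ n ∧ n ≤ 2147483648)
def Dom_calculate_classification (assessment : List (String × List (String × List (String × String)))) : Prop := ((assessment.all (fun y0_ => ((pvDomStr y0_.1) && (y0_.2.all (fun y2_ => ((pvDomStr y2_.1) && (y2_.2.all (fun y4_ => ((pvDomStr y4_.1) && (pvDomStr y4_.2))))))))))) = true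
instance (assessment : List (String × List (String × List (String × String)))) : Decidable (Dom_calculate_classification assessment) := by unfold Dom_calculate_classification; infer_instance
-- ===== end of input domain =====

-- B changes only the classification step: one min-over-ranks pass instead of three count scans and an if/elif chain (objective: simpler).

-- ===== PORT A =====
-- the triple loop flattening all responses (shared verbatim by both Pythons)
def pvFlatten (assessment : List (String × List (String × List (String × String)))) : List String :=
  assessment.foldl (fun acc category =>
    category.2.foldl (fun acc subcategory =>
      subcategory.2.foldl (fun acc response => acc ++ [response.2]) acc) acc) []

def calculate_classification (assessment : List (String × List (String × List (String × String)))) : String :=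
  let all_responses := pvFlatten assessment
  let high_count := PySem.List.count all_responses "high"
  let medium_count := PySem.List.count all_responses "medium"
  let low_count := PySem.List.count all_responses "low"
  if high_count > 0 then "top_secret"
  else if medium_count > 0 then "secret"
  else if low_count > 0 then "restricted"
  else "public"

-- ===== PORT B =====
-- order = {'high': 0, 'medium': 1, 'low': 2} as a lookup
def pvOrder (r : String) : Option Nat :=
  if r = "high" then some 0 else if r = "medium" then some 1 else if r = "low" then some 2 else none

def calculate_classification_alt (assessment : List (String × List (String × List (String × String)))) : String :=
  let all_responses := pvFlatten assessment
  -- best = min((order[r] for r in all_responses if r in order), default=3)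
  let best := all_responses.foldl (fun b r => (pvOrder r).elim b (min b)) 3
  ["top_secret", "secret", "restricted", "public"].getD best "public"

-- ===== PRECONDITION & SPEC =====
def Spec_calculate_classification (assessment : List (String × List (String × List (String × String)))) (out : String) : Prop := out = calculate_classification_alt assessment
instance (assessment : List (String × List (String × List (String × String)))) (out : String) : Decidable (Spec_calculate_classification assessment out) := by unfold Spec_calculate_classification; infer_instance

-- ===== CLAIM (what is proved, stated in full; the proofs are below) =====
def Claim_equal_calculate_classification : Prop := ∀ (assessment : List (String × List (String × List (String × String)))), Dom_calculate_classification assessment → Spec_calculate_classification assessment (calculate_classification assessment)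

-- ===== LEMMAS AND PROOFS =====

-- closed form of B's fold: the minimum rank present, seeded by b
def pvBest (xs : List String) : Nat :=
  if "high" ∈ xs then 0 else if "medium" ∈ xs then 1 else if "low" ∈ xs then 2 else 3

lemma pvFoldl_best (xs : List String) (b : Nat) (hb : b ≤ 3) :
    xs.foldl (fun b r => (pvOrder r).elim b (min b)) b = min b (pvBest xs) := by
  induction xs generalizing b with
  | nil => simp [pvBest]; omega
  | cons a t ih =>
    rw [List.foldl_cons]
    have hle : ((pvOrder a).elim b (min b)) ≤ 3 := by
      cases pvOrder a <;> simp <;> omega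
    rw [ih _ hle]
    by_cases h1 : a = "high" <;> by_cases h2 : a = "medium" <;> by_cases h3 : a = "low" <;>
      simp [pvOrder, pvBest, h1, h2, h3, eq_comm] <;> split_ifs <;> omega

theorem calculate_classification_spec_aux (xs : List String) :
    (if PySem.List.count xs "high" > 0 then "top_secret"
     else if PySem.List.count xs "medium" > 0 then "secret"
     else if PySem.List.count xs "low" > 0 then "restricted"
     else "public")
    = ["top_secret", "secret", "restricted", "public"].getD
        (xs.foldl (fun b r => (pvOrder r).elim b (min b)) 3) "public" := by
  rw [pvFoldl_best _ _ (by omega)]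
  simp only [PySem.List.count_eq, pvBest]
  by_cases h1 : "high" ∈ xs <;> by_cases h2 : "medium" ∈ xs <;> by_cases h3 : "low" ∈ xs <;>
    simp [h1, h2, h3, List.count_pos_iff, List.count_eq_zero_of_not_mem]

-- ===== VERDICT (by name: the statement is the Claim_ definition above) =====
theorem calculate_classification_spec : Claim_equal_calculate_classification := by
  intro assessment _
  unfold Spec_calculate_classification calculate_classification calculate_classification_alt
  exact calculate_classification_spec_aux (pvFlatten assessment)
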